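/-
  THE SEGMENTS OF `DGifGetExtension` (dgif_lib.c:569-591; 57 instructions; a PROTECTED frame: the byte `Buf`): the assertions at
  its cut points, the segment claims, and the COMPOSITION (segments ⇒ `DGifGetExtension.spec`), proved here. The template is
  `DGifGetWord` (Gif/Spec/ReaderSegs.lean).

      unit                     addresses                                  instructions   calls
      DGifGetExtension.P       109A80H … 109ACAH                          16             —
      DGifGetExtension.1       109ACAH … 109AFBH, 109B16H … 109B45H       23             InternalRead; the checks load8, load4, store4
      DGifGetExtension.2       109B45H … 109B67H                           9             DGifGetExtensionNext; the check store4
      DGifGetExtension.E       109AFBH … 109B16H                           9             —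

  THE FRAME: five pushes (`r14 r13 r12 rbp rbx`), `sub rsp, 64`: `rsp = RA − 104` (`RA` = the entry's `rsp`); the protected frame's
  base is `RA − 104` (= the body's `rsp`), 64 bytes; its object `Buf` is the byte at `RA − 72` (`[rsp + 20H]`). The registers of the
  body: `rbx = gif`, `r13 = ExtCode`, `r14 = Extension`, `rbp` = the shadow index `(RA − 104) >> 3`; `r12` is a scratch register
  (the private object, the function code, then THE RESULT: the epilogue does `mov eax, r12d`); `r15` is never touched.

  `*ExtCode` AND `*Extension` ARE STACK OBJECTS OF THE CALLER: segment 2 needs MORE of them than `BufOK` says.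
  (a) `DGifGetExtensionNext` needs its `Extension` off `pv.Buf` (Gif/Spec/Seg_DGifGetExtensionNext.lean, header): its pre asks
  `OutPtr`, this function's pre gives it (`OutPtr.push` for the one more frame). (b) The post says `*ExtCode ≤ 255` AFTER the call of
  `DGifGetExtensionNext`, whose footprint has `pv.Buf`, `*Extension`, `gif.Error` and the cursor's `cur`: `BufOK.loose` alone admits
  an `ExtCode` inside `pv.Buf` or AT `&gif.Error`; the precondition's `OutPtr.low` (`ExtCode + 4 ≤ 800000H`, `Extension + 8 ≤ 800000H`:
  STACK addresses; the only caller, DGifSlurp, passes two stack objects of its own frame) and its disjointness clause exclude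
  that. Every assertion carries `pre`, and segment 2 takes the facts from there.
-/
import Gif.Spec.Reader
import Gif.LabelsAt
namespace Gif.Spec
open X86 X86.User Asan ProgX.Base ProgX.Base.Spec

namespace DGifGetExtension

/-- The active frames inside the body: the function's own protected frame (`base = RA − 104`), innermost. -/
abbrev framesIn (frames : List (Nat × FrameLayout)) (e : State) : List (Nat × FrameLayout) :=
  ((e.reg .rsp).toNat - 104, Gif.Frames.DGifGetExtension) :: frames

/-- **IN THE BODY of `DGifGetExtension`**, at the address `cut`, inside the call that was entered at the state `e` (return address
`ret`) with the function's precondition. The prologue is done. -/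
structure Body (cut : Word) (H : Heap) (rest : List Obj) (frames : List (Nat × FrameLayout)) (F : Forest) (R : Rd) (u₀ e : State)
    (ret : Word) (v : State) : Prop where
  /-- the function was entered at `e` … -/
  entry : AtEntry (conv u₀) Gif.L.DGifGetExtension.entry (DGifGetExtension.spec H rest frames F R).frame ret e
  /-- … with its precondition -/
  pre : (DGifGetExtension.spec H rest frames F R).pre e
  /-- `*ExtCode` (4 bytes) and `*Extension` (8 bytes), each inside a live object at or above 700000H, lie above the
  return-address slot: a store through them — by this function or by `DGifGetExtensionNext` — meets neither this function's
  stack nor the return address. (Consequences of `entry` and `pre`, stated once.) -/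
  code_above : (e.reg .rsp).toNat + 8 ≤ (e.reg .rsi).toNat
  ext_above : (e.reg .rsp).toNat + 8 ≤ (e.reg .rdx).toNat
  rip : v.rip = cut
  /-- five pushes and `sub rsp, 64` -/
  rsp : v.reg .rsp = e.reg .rsp - 104
  /-- `mov rbx, rdi`: gif -/
  rbx : v.reg .rbx = e.reg .rdi
  /-- `mov r13, rsi`: ExtCode -/
  r13 : v.reg .r13 = e.reg .rsi
  /-- `mov r14, rdx`: Extension -/
  r14 : v.reg .r14 = e.reg .rdx
  /-- `mov rbp, rsp ; shr rbp, 3`: the shadow index of the frame -/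
  rbp : v.reg .rbp = (e.reg .rsp - 104) >>> 3
  /-- never touched (not pushed: the caller gets it back as it is) -/
  r15 : v.reg .r15 = e.reg .r15
  /-- the saved registers, in push order (`r14 r13 r12 rbp rbx`): the pops 109B0DH … 109B13H restore them -/
  slot_r14 : v.mem.readLE (e.reg .rsp - 8) 8 = (e.reg .r14).toNat
  slot_r13 : v.mem.readLE (e.reg .rsp - 16) 8 = (e.reg .r13).toNat
  slot_r12 : v.mem.readLE (e.reg .rsp - 24) 8 = (e.reg .r12).toNat
  slot_rbp : v.mem.readLE (e.reg .rsp - 32) 8 = (e.reg .rbp).toNat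
  slot_rbx : v.mem.readLE (e.reg .rsp - 40) 8 = (e.reg .rbx).toNat
  /-- the return-address slot `[RA, RA + 8)` still holds `ret` (no store of the function or of a callee goes there): the `ret`
  at 109B15H pops it -/
  slot_ra : UInt64.ofNat (v.mem.readLE (e.reg .rsp) 8) = ret
  /-- the heap's invariant, with the function's OWN frame pushed; the clean stack ends at the body's `rsp` -/
  inv : HeapInv H rest (framesIn frames e) ((e.reg .rsp).toNat - 104) v.mem
  /-- the state invariant -/
  ok : GifOK H F R v.mem
  /-- the reader did not go back -/
  rem : rem R v.mem ≤ rem R e.mem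
  /-- nothing was written but the function's stack (its callees' included), the 8 shadow bytes of its frame, and the contract's
  windows -/
  same : Mem.SameExcept
    [⟨(e.reg .rsp).toNat - 432, (e.reg .rsp).toNat⟩,
     shadowSpan ((e.reg .rsp).toNat - 104) ((e.reg .rsp).toNat - 40),
     ⟨F.pv + 88, F.pv + 344⟩,
     ⟨(e.reg .rsi).toNat, (e.reg .rsi).toNat + 4⟩,
     ⟨(e.reg .rdx).toNat, (e.reg .rdx).toNat + 8⟩,
     ⟨F.gif + 96, F.gif + 100⟩,
     ⟨R.cur, R.cur + 8⟩] e.mem v.mem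
  code : (conv u₀).code.In v.mem
  abi : (conv u₀).inv v

/-- **AFTER THE PROLOGUE** (at 109ACAH, `lea rdi, [rdi + 70H]`, l.572): `Body`, and `rdi` still holds gif. -/
structure Start (H : Heap) (rest : List Obj) (frames : List (Nat × FrameLayout)) (F : Forest) (R : Rd) (u₀ e : State)
    (ret : Word) (v : State) : Prop where
  body : Body Gif.L.DGifGetExtension.at_109aca H rest frames F R u₀ e ret v
  /-- the prologue did not change `rdi` -/
  rdi : v.reg .rdi = e.reg .rdi
  /-- the prologue did not move the reader: EXACTLY (the posts count the bytes consumed from the entry; `Body.rem` alone, an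
  inequality, would not give `rem + 1 = rem₀` after the first read) -/
  rem_eq : rem R v.mem = rem R e.mem

/-- **AFTER THE SUCCESSFUL READ** (at 109B45H, `movzx r12d, BYTE PTR [rsp + 20H]`, l.586): `InternalRead(gif, &Buf, 1)` returned 1:
the reader advanced by exactly one byte. The value of `Buf` (the byte at `RA − 72`) is ANYTHING (a byte: so `*ExtCode ≤ 255`). -/
structure AfterRead (H : Heap) (rest : List Obj) (frames : List (Nat × FrameLayout)) (F : Forest) (R : Rd) (u₀ e : State)
    (ret : Word) (v : State) : Prop where
  body : Body Gif.L.DGifGetExtension.at_109b45 H rest frames F R u₀ e ret v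
  /-- `ReadPost` with `k = n = 1` -/
  rem_eq : rem R v.mem + 1 = rem R e.mem

/-- **BEFORE THE EPILOGUE** (at 109AFBH, the store that clears the frame's shadow): `Body`, THE RESULT IN `r12` (zero-extended:
`mov r12d, eax` after `and eax, 8` or after the call of `DGifGetExtensionNext`, or `mov r12d, 0`), and the contract's
postcondition stated of the present memory. -/
structure Done (H : Heap) (rest : List Obj) (frames : List (Nat × FrameLayout)) (F : Forest) (R : Rd) (u₀ e : State)
    (ret : Word) (v : State) : Prop where
  body : Body Gif.L.DGifGetExtension.at_109afb H rest frames F R u₀ e ret v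
  /-- GIF_OK (1) or GIF_ERROR (0), in `r12` -/
  res : (v.reg .r12).toNat = 1 ∨ (v.reg .r12).toNat = 0
  /-- GIF_OK: the function code is a byte; the terminator (two bytes consumed) or a sub-block in `pv.Buf` (`2 + n` bytes) -/
  ok1 : (v.reg .r12).toNat = 1 →
    rd v.mem (e.reg .rsi).toNat 4 ≤ 255 ∧
    ((rd v.mem (e.reg .rdx).toNat 8 = 0 ∧ rem R v.mem + 2 = rem R e.mem) ∨
     (rd v.mem (e.reg .rdx).toNat 8 = F.pv + 88 ∧ 1 ≤ rd v.mem (F.pv + 88) 1 ∧ rd v.mem (F.pv + 88) 1 ≤ 255 ∧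
       rem R v.mem + 2 + rd v.mem (F.pv + 88) 1 = rem R e.mem))

/-- **Segment P** (the prologue, 109A80H … 109ACAH, 16 instructions): five pushes, `sub rsp, 64`, the three argument moves, the
frame's three header words, the shadow index, the two poison stores. -/
def SegP (Lay : Layout) (μ : Microarch) (u₀ : State) : Prop :=
  ∀ (H : Heap) (rest : List Obj) (frames : List (Nat × FrameLayout)) (F : Forest) (R : Rd) (e : State) (ret : Word),
    AtEntry (conv u₀) Gif.L.DGifGetExtension.entry (DGifGetExtension.spec H rest frames F R).frame ret e →
    (DGifGetExtension.spec H rest frames F R).pre e →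
    ReachVia Lay μ WayInv e (Start H rest frames F R u₀ e ret)

/-- **Segment 1** (109ACAH … 109AFBH and 109B16H … 109B45H, 23 instructions; l.572-585): the checked loads of `gif.Private` and
`pv.FileState`; `FileState & 8 = 0` (dead by `Shape.state`, or walked: l.577, the checked store of `gif.Error`, `r12d = 0`): `Done`;
else `InternalRead(gif, &Buf, 1)` into the frame's object `Buf` (`BufOK`: `LiveIn` through the own frame's object, `Loose.stack`
below the cursor, `HeapWin.offHeap`); not 1: l.583, the checked store of `gif.Error`, `r12d = 0`: `Done`; 1: `AfterRead`. -/
def Seg1 (Lay : Layout) (μ : Microarch) (u₀ : State) : Prop :=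
  ∀ (H : Heap) (rest : List Obj) (frames : List (Nat × FrameLayout)) (F : Forest) (R : Rd) (e : State) (ret : Word) (v : State),
    Start H rest frames F R u₀ e ret v →
    ReachVia Lay μ WayInv v (fun w => Done H rest frames F R u₀ e ret w ∨ AfterRead H rest frames F R u₀ e ret w)

/-- **Segment 2** (109B45H … 109B67H, 9 instructions; l.586-590): the checked store `*ExtCode = Buf` (a byte, zero-extended);
`DGifGetExtensionNext(gif, Extension)` with the frames `framesIn frames e` (its `BufOK` from this function's pre: `LiveIn` with one
more frame); `r12d` = its result. Its `BlockPost`, counted from a reader that had already advanced by one byte, is the second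
clause of `Done.ok1`; `*ExtCode` is unchanged by the call (`OutPtr.low` and the disjointness clause of the pre, see the header). -/
def Seg2 (Lay : Layout) (μ : Microarch) (u₀ : State) : Prop :=
  ∀ (H : Heap) (rest : List Obj) (frames : List (Nat × FrameLayout)) (F : Forest) (R : Rd) (e : State) (ret : Word) (v : State),
    AfterRead H rest frames F R u₀ e ret v →
    ReachVia Lay μ WayInv v (Done H rest frames F R u₀ e ret)

/-- **Segment E** (the epilogue, 109AFBH … 109B16H, 9 instructions): the 8-byte store that clears the frame's shadow,
`mov eax, r12d`, `add rsp, 64`, five pops, `ret`. -/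
def SegE (Lay : Layout) (μ : Microarch) (u₀ : State) : Prop :=
  ∀ (H : Heap) (rest : List Obj) (frames : List (Nat × FrameLayout)) (F : Forest) (R : Rd) (e : State) (ret : Word) (v : State),
    Done H rest frames F R u₀ e ret v →
    ReachVia Lay μ WayInv v (Returned (conv u₀) (DGifGetExtension.spec H rest frames F R) e ret)

/-- **The composition of `DGifGetExtension`**: P, then 1, which ends before the epilogue or goes on with 2; then E. -/
theorem compose {Lay : Layout} {μ : Microarch} {u₀ : State} (hP : SegP Lay μ u₀) (h1 : Seg1 Lay μ u₀) (h2 : Seg2 Lay μ u₀)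
    (hE : SegE Lay μ u₀) :
    ∀ (H : Heap) (rest : List Obj) (frames : List (Nat × FrameLayout)) (F : Forest) (R : Rd),
      Calls Lay μ WayInv (conv u₀) Gif.L.DGifGetExtension.entry (DGifGetExtension.spec H rest frames F R) := by
  intro H rest frames F R e ret he hp
  refine (hP H rest frames F R e ret he hp).trans ?_
  intro v hv
  refine (h1 H rest frames F R e ret v hv).trans ?_
  intro w hw
  rcases hw with hdone | hread
  · exact hE H rest frames F R e ret w hdone
  · refine (h2 H rest frames F R e ret w hread).trans ?_
    intro x hx
    exact hE H rest frames F R e ret x hx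

end DGifGetExtension

end Gif.Spec
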